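-- pv_equiv track=rewrite | github.com/Rezaya1234/jobmatch | agents/search_agent.py | _classify_titles
-- ===== SOURCE A (Python) =====
-- def _classify_titles(titles: list[str], keyword_map: dict[str, list[str]]) -> dict[str, int]:
--     """Classify job titles into categories using keyword matching. First match wins."""
--     counts: dict[str, int] = {}
--     for title in titles:
--         lower = title.lower()
--         matched = False
--         for category, keywords in keyword_map.items():
--             if any(kw in lower for kw in keywords):
--                 counts[category] = counts.get(category, 0) + 1
--                 matched = True
--                 break
--         if not matched:
--             counts["other"] = counts.get("other", 0) + 1
--     return counts
-- ===== SOURCE B (Python) =====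
-- def _classify_titles(titles: list[str], keyword_map: dict[str, list[str]]) -> dict[str, int]:
--     """Category-major sweep: each category pass, in map order, claims the still-unlabeled
--     titles it matches; whatever survives every pass stays labeled 'other'."""
--     lows = [t.lower() for t in titles]
--     labels = ["other"] * len(titles)
--     remaining = list(range(len(titles)))
--     for category, keywords in keyword_map.items():
--         still = []
--         for i in remaining:
--             if any(kw in lows[i] for kw in keywords):
--                 labels[i] = category
--             else:
--                 still.append(i)
--         remaining = still
--     counts: dict[str, int] = {}
--     for lab in labels:
--         counts[lab] = counts.get(lab, 0) + 1
--     return counts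
-- ===== Notes on version B (the rewrite author's own statement) =====
-- stated objective: alternative
-- what changed: A scans the categories afresh for every title, breaking at the first match; B transposes the loops: one pass per category over a shrinking pool of still-unlabeled title indices assigns labels (first-match-wins falls out because claimed titles leave the pool), then a final title-order pass tallies the labels into the result dict.
import Mathlib
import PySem

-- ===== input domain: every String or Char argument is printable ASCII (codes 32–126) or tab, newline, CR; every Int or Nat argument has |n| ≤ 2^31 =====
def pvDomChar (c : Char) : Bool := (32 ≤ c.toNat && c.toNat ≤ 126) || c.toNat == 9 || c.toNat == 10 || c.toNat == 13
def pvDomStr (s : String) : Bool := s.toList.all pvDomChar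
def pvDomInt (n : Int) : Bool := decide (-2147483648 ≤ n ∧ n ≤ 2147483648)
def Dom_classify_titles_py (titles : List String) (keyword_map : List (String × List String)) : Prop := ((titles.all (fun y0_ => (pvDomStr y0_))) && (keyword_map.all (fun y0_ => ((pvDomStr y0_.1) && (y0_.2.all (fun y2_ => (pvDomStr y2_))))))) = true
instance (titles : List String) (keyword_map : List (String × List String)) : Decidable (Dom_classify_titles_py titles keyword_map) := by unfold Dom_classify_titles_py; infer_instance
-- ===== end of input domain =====

-- B transposes A's loops: one pass per category over a shrinking pool of unlabeled title
-- indices assigns labels, then a title-order pass tallies them (alternative decomposition).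

-- ===== PORT A =====
-- inner 'for category, keywords in keyword_map.items(): … break' loop with the matched flag,
-- as the option of the first matching category
def pvFirstCatA (lower : String) : List (String × List String) → Option String
  | [] => none
  | (cat, kws) :: rest =>
      if kws.any (fun kw => PySem.Str.isIn kw lower) then some cat else pvFirstCatA lower rest

def classify_titles_py (titles : List String) (keyword_map : List (String × List String)) : List (String × Int) :=
  (titles.foldl (fun counts title =>
      let lower := PySem.Str.lower title
      match pvFirstCatA lower keyword_map with
      | some cat => counts.insert cat (counts.getD cat 0 + 1)
      | none => counts.insert "other" (counts.getD "other" 0 + 1))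
    PySem.Dict.empty).items

-- ===== PORT B =====
-- one category's pass: claim matching indices of the pool into labels, keep the rest
def pvCatPassB (lows : List String) (cat : String) (kws : List String)
    (st : List String × List Nat) : List String × List Nat :=
  st.2.foldl (fun (st' : List String × List Nat) i =>
      if kws.any (fun kw => PySem.Str.isIn kw (lows.getD i "")) then (st'.1.set i cat, st'.2)
      else (st'.1, st'.2 ++ [i]))
    (st.1, [])

def classify_titles_py_alt (titles : List String) (keyword_map : List (String × List String)) : List (String × Int) :=
  let lows := titles.map PySem.Str.lower
  let st := keyword_map.foldl (fun st ck => pvCatPassB lows ck.1 ck.2 st)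
      (List.replicate titles.length "other", List.range titles.length)
  (st.1.foldl (fun counts lab => counts.insert lab (counts.getD lab 0 + 1)) PySem.Dict.empty).items

-- ===== PRECONDITION & SPEC =====
def Spec_classify_titles_py (titles : List String) (keyword_map : List (String × List String)) (out : List (String × Int)) : Prop := out = classify_titles_py_alt titles keyword_map
instance (titles : List String) (keyword_map : List (String × List String)) (out : List (String × Int)) : Decidable (Spec_classify_titles_py titles keyword_map out) := by unfold Spec_classify_titles_py; infer_instance

-- ===== CLAIM =====
def Claim_equal_classify_titles_py : Prop := ∀ (titles : List String) (keyword_map : List (String × List String)), Dom_classify_titles_py titles keyword_map → Spec_classify_titles_py titles keyword_map (classify_titles_py titles keyword_map)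

-- ===== LEMMAS AND PROOFS =====

-- the label A assigns to one title
def pvLabelA (km : List (String × List String)) (low : String) : String :=
  (pvFirstCatA low km).getD "other"

theorem pvFirstCatA_append (low : String) (d1 d2 : List (String × List String)) :
    pvFirstCatA low (d1 ++ d2) = (pvFirstCatA low d1).or (pvFirstCatA low d2) := by
  induction d1 with
  | nil => simp [pvFirstCatA]
  | cons ck rest ih =>
      obtain ⟨c, k⟩ := ck
      simp only [List.cons_append, pvFirstCatA]
      cases h : k.any (fun kw => PySem.Str.isIn kw low)
      · rw [if_neg (by simp), if_neg (by simp), ih]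
      · rw [if_pos rfl, if_pos rfl, Option.some_or]

-- A's first-match over a singleton category list, by definition
theorem pvFirstCatA_singleton (low : String) (cat : String) (kws : List String) :
    pvFirstCatA low [(cat, kws)]
      = if kws.any (fun kw => PySem.Str.isIn kw low) then some cat else none := rfl

-- one category pass, split into the label updates and the surviving pool
theorem pvCatPassB_spec (lows : List String) (cat : String) (kws : List String)
    (rem : List Nat) (labels : List String) (s : List Nat) :
    rem.foldl (fun (st' : List String × List Nat) i =>
        if kws.any (fun kw => PySem.Str.isIn kw (lows.getD i "")) then (st'.1.set i cat, st'.2)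
        else (st'.1, st'.2 ++ [i])) (labels, s)
    = (rem.foldl (fun L i => if kws.any (fun kw => PySem.Str.isIn kw (lows.getD i "")) then L.set i cat else L) labels,
       s ++ rem.filter (fun i => !(kws.any (fun kw => PySem.Str.isIn kw (lows.getD i ""))))) := by
  induction rem generalizing labels s with
  | nil => simp
  | cons i rest ih =>
      simp only [List.foldl_cons, List.filter_cons]
      cases h : kws.any (fun kw => PySem.Str.isIn kw (lows.getD i ""))
      · rw [if_neg (by simp), ih]
        simp
      · rw [if_pos rfl, ih]
        simp

-- pointwise effect of the set-fold of one pass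
theorem setFold_getD (p : Nat → Bool) (cat : String) (rem : List Nat) (labels : List String)
    (hnd : rem.Nodup) (hlt : ∀ i ∈ rem, i < labels.length) (j : Nat) :
    (rem.foldl (fun L i => if p i then L.set i cat else L) labels).getD j "" =
      if j ∈ rem ∧ p j then cat else labels.getD j "" := by
  induction rem generalizing labels with
  | nil => simp
  | cons i rest ih =>
      have hnd' := hnd.of_cons
      have hi : i ∉ rest := (List.nodup_cons.mp hnd).1
      have hlt' : ∀ k ∈ rest, k < labels.length := fun k hk => hlt k (List.mem_cons_of_mem _ hk)
      simp only [List.foldl_cons]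
      cases h : p i
      · rw [if_neg (by simp), ih labels hnd' hlt']
        by_cases hji : j = i
        · subst hji; simp [hi, h]
        · simp [List.mem_cons, hji]
      · rw [if_pos rfl, ih (labels.set i cat) hnd' (by simpa using hlt')]
        by_cases hji : j = i
        · subst hji
          have hjl : j < labels.length := hlt j (List.mem_cons_self ..)
          simp [hi, h, List.getD_eq_getElem?_getD, List.getElem?_set_eq_of_lt _ hjl]
        · rw [List.getD_eq_getElem?_getD, List.getElem?_set_ne (by omega),
            ← List.getD_eq_getElem?_getD]
          simp [List.mem_cons, hji]

-- the updates of one pass do not change the length of the label list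
theorem setFold_length (p : Nat → Bool) (cat : String) (rem : List Nat) (labels : List String) :
    (rem.foldl (fun L i => if p i then L.set i cat else L) labels).length = labels.length := by
  induction rem generalizing labels with
  | nil => rfl
  | cons i rest ih =>
      simp only [List.foldl_cons]
      cases h : p i
      · rw [if_neg (by simp), ih]
      · rw [if_pos rfl, ih, List.length_set]

-- the loop invariant of B's category-major sweep
def pvInv (lows : List String) (done : List (String × List String))
    (st : List String × List Nat) : Prop :=
  st.1.length = lows.length ∧
  st.2 = (List.range lows.length).filter (fun i => (pvFirstCatA (lows.getD i "") done).isNone) ∧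
  ∀ j < lows.length, st.1.getD j "" = pvLabelA done (lows.getD j "")

theorem pvInv_step (lows : List String) (done : List (String × List String))
    (ck : String × List String) (st : List String × List Nat) (h : pvInv lows done st) :
    pvInv lows (done ++ [ck]) (pvCatPassB lows ck.1 ck.2 st) := by
  obtain ⟨cat, kws⟩ := ck
  obtain ⟨hlen, hrem, hlab⟩ := h
  have hnd : st.2.Nodup := hrem ▸ (List.nodup_range).filter _
  have hlt : ∀ i ∈ st.2, i < st.1.length := by
    intro i hi
    rw [hrem] at hi
    have := List.mem_range.mp (List.mem_of_mem_filter hi)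
    omega
  have hmem : ∀ j, j ∈ st.2 ↔ (j < lows.length ∧ (pvFirstCatA (lows.getD j "") done).isNone) := by
    intro j; rw [hrem]; simp [List.mem_filter]
  unfold pvCatPassB
  rw [pvCatPassB_spec]
  refine ⟨by rw [setFold_length, hlen], ?_, ?_⟩
  · -- the surviving pool is exactly the pool still unmatched after this category
    simp only [List.nil_append]
    rw [hrem, List.filter_filter]
    apply List.filter_congr
    intro j hj
    rw [pvFirstCatA_append, pvFirstCatA_singleton]
    cases hD : pvFirstCatA (lows.getD j "") done
    · rw [Option.none_or]
      cases hC : kws.any (fun kw => PySem.Str.isIn kw (lows.getD j ""))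
      · rw [if_neg (by simp)]; simp
      · rw [if_pos rfl]; simp
    · rw [Option.some_or]; simp
  · -- every slot holds the first-match label of the extended category list
    intro j hjn
    rw [setFold_getD _ cat st.2 st.1 hnd hlt j]
    unfold pvLabelA
    rw [pvFirstCatA_append, pvFirstCatA_singleton]
    cases hD : pvFirstCatA (lows.getD j "") done
    · have hjm : j ∈ st.2 := (hmem j).mpr ⟨hjn, by rw [hD]; rfl⟩
      rw [Option.none_or]
      cases hC : kws.any (fun kw => PySem.Str.isIn kw (lows.getD j ""))
      · rw [if_neg (by simp), if_neg (by simp)]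
        have := hlab j hjn
        unfold pvLabelA at this
        rw [this, hD]
      · rw [if_pos rfl, if_pos ⟨hjm, rfl⟩]
        rfl
    · have hjm : j ∉ st.2 := fun hh => by
        have := ((hmem j).mp hh).2
        rw [hD] at this
        exact absurd this (by simp)
      rw [Option.some_or, if_neg (fun hh => hjm hh.1)]
      have := hlab j hjn
      unfold pvLabelA at this
      rw [this, hD]

theorem pvInv_foldl (lows : List String) (km : List (String × List String)) :
    ∀ (done : List (String × List String)) (st : List String × List Nat), pvInv lows done st →
      pvInv lows (done ++ km) (km.foldl (fun st ck => pvCatPassB lows ck.1 ck.2 st) st) := by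
  induction km with
  | nil => intro done st h; simpa using h
  | cons ck rest ih =>
      intro done st h
      have := ih (done ++ [ck]) _ (pvInv_step lows done ck st h)
      simpa using this

-- the sweep's final labels are exactly A's per-title labels, in title order
theorem labels_eq (titles : List String) (km : List (String × List String)) :
    (km.foldl (fun st ck => pvCatPassB (titles.map PySem.Str.lower) ck.1 ck.2 st)
      (List.replicate titles.length "other", List.range titles.length)).1
    = titles.map (fun t => pvLabelA km (PySem.Str.lower t)) := by
  set lows := titles.map PySem.Str.lower with hlo
  have hbase : pvInv lows [] (List.replicate titles.length "other", List.range titles.length) := by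
    refine ⟨by rw [hlo]; simp, by simp [pvFirstCatA, hlo], ?_⟩
    intro j hj
    rw [hlo] at hj
    simp only [List.length_map] at hj
    simp [pvLabelA, pvFirstCatA, List.getD_eq_getElem?_getD, hj]
  have hfin := pvInv_foldl lows km [] _ hbase
  rw [List.nil_append] at hfin
  obtain ⟨hlen, _, hlab⟩ := hfin
  apply List.ext_getElem
  · rw [hlen, hlo]; simp
  · intro j h1 h2
    have hjn : j < lows.length := by rw [hlo]; simpa using h2
    have hj' := hlab j hjn
    rw [List.getD_eq_getElem?_getD, List.getElem?_eq_getElem h1] at hj'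
    simp only [Option.getD_some] at hj'
    rw [hj']
    have hjt : j < titles.length := by simpa using h2
    simp [hlo, pvLabelA, List.getD_eq_getElem?_getD, List.getElem?_eq_getElem hjt]

-- ===== VERDICT =====
theorem classify_titles_py_spec : Claim_equal_classify_titles_py := by
  intro titles km _
  unfold Spec_classify_titles_py classify_titles_py classify_titles_py_alt
  simp only [labels_eq, List.foldl_map]
  refine congrArg PySem.Dict.items (congrArg (fun f => List.foldl f PySem.Dict.empty titles) ?_)
  funext d t
  cases h : pvFirstCatA (PySem.Str.lower t) km <;> simp [pvLabelA, h]
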